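-- pv_equiv track=rewrite | github.com/tonypurba/myblendercontrib | game_engine_ragdolls_kit/brik.py | find_optimal_bone_order
-- ===== SOURCE A (Python) =====
-- def find_optimal_bone_order(boneChainsDict, maxLength):
--     tempBoneChainsOrder = []
--
--     #Reorder the bone chains so that shorter bone chains are at the start of the list
--     for n in range(1,maxLength+1):
--         for chain in boneChainsDict:
--             if len(boneChainsDict[chain]) == n:
--                 tempBoneChainsOrder.append(boneChainsDict[chain])
--
--     #Create a final list of bones so that the bones that need to be calculated first are
--     #at the start
--     finalBoneOrder = []
--     for chain in tempBoneChainsOrder: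
--         finalBoneOrder.append(chain[0])
--     return finalBoneOrder
-- ===== SOURCE B (Python) =====
-- def find_optimal_bone_order(boneChainsDict, maxLength):
--     # One pass: bucket each chain by its length, then emit heads length by length.
--     buckets = {}
--     for key in boneChainsDict:
--         chain = boneChainsDict[key]
--         buckets.setdefault(len(chain), []).append(chain)
--
--     finalBoneOrder = []
--     for n in range(1, maxLength + 1):
--         for chain in buckets.get(n, []):
--             finalBoneOrder.append(chain[0])
--     return finalBoneOrder
-- ===== Notes on version B (the rewrite author's own statement) =====
-- stated objective: faster
-- what changed: B builds a length->chains bucket index in one pass over the dict and then emits heads per length, instead of A's rescan of the whole dict for every length from 1 to maxLength.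
import Mathlib
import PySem

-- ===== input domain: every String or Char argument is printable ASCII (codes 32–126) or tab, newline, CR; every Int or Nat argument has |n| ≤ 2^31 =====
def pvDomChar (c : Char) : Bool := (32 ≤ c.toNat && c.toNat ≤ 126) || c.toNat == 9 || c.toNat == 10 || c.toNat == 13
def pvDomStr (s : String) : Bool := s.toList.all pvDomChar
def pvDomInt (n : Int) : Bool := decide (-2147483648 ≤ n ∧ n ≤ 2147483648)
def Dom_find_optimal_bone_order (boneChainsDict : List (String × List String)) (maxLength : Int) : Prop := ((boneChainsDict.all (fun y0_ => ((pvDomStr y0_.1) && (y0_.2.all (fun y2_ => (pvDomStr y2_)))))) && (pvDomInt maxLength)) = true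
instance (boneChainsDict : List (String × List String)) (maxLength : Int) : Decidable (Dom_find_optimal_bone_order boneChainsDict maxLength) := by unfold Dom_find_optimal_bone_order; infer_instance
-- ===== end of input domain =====

-- B replaces A's rescan of the dict for every length 1..maxLength by a single
-- bucketing pass (length -> chains) followed by an emission pass; asymptotic speedup.

-- shared helper: `boneChainsDict[key]` — Python dict lookup, first match in insertion
-- order; the default [] is never reached since both ports only look up keys of the list.
def pvLookup (d : List (String × List String)) (k : String) : List String :=
  (PySem.Dict.mk d).getD k []

-- ===== PORT A =====
def find_optimal_bone_order (boneChainsDict : List (String × List String)) (maxLength : Int) : List String :=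
  let tempBoneChainsOrder :=
    (PySem.List.pyRange 1 (maxLength + 1) 1).foldl (fun acc n =>
      boneChainsDict.foldl (fun acc kv =>
        if ((pvLookup boneChainsDict kv.1).length : Int) == n then
          acc ++ [pvLookup boneChainsDict kv.1]
        else acc) acc) []
  -- chain[0]: every chain appended above has length n ≥ 1, so headD is exact here
  tempBoneChainsOrder.foldl (fun acc chain => acc ++ [chain.headD ""]) []

-- ===== PORT B =====
def find_optimal_bone_order_alt (boneChainsDict : List (String × List String)) (maxLength : Int) : List String :=
  let buckets :=
    boneChainsDict.foldl (fun d kv =>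
      let chain := pvLookup boneChainsDict kv.1
      -- buckets.setdefault(len(chain), []).append(chain)
      d.modify ((chain.length : Int)) [] (· ++ [chain])) PySem.Dict.empty
  (PySem.List.pyRange 1 (maxLength + 1) 1).foldl (fun acc n =>
    (buckets.getD n []).foldl (fun acc chain =>
      -- chain[0]: buckets.get(n, []) with n ≥ 1 holds only nonempty chains
      acc ++ [chain.headD ""]) acc) []

-- ===== PRECONDITION & SPEC =====
def Spec_find_optimal_bone_order (boneChainsDict : List (String × List String)) (maxLength : Int) (out : List String) : Prop := out = find_optimal_bone_order_alt boneChainsDict maxLength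
instance (boneChainsDict : List (String × List String)) (maxLength : Int) (out : List String) : Decidable (Spec_find_optimal_bone_order boneChainsDict maxLength out) := by unfold Spec_find_optimal_bone_order; infer_instance

-- ===== CLAIM (what is proved, stated in full; the proofs are below) =====
def Claim_equal_find_optimal_bone_order : Prop := ∀ (boneChainsDict : List (String × List String)) (maxLength : Int), Dom_find_optimal_bone_order boneChainsDict maxLength → Spec_find_optimal_bone_order boneChainsDict maxLength (find_optimal_bone_order boneChainsDict maxLength)

-- ===== LEMMAS AND PROOFS =====

-- B's buckets hold exactly the chains of each length, in dict order
theorem pv_bucket (bcd : List (String × List String)) (n : Int) :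
    (bcd.foldl (fun d kv =>
        d.modify (((pvLookup bcd kv.1).length : Int)) [] (· ++ [pvLookup bcd kv.1]))
      PySem.Dict.empty).getD n []
    = (bcd.map (fun kv => pvLookup bcd kv.1)).filter
        (fun c => ((c.length : Int) == n)) := by
  have h := PySem.Dict.getD_foldl_modify_append
      (l := bcd.map (fun kv => (((pvLookup bcd kv.1).length : Int), pvLookup bcd kv.1)))
      (d := PySem.Dict.empty) (c := n)
  rw [List.foldl_map] at h
  simp only [h, PySem.Dict.getD_empty, List.nil_append, List.filter_map]
  rw [List.map_map]
  simp [Function.comp_def]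

-- mapping a function over an "acc ++ F n" loop pushes the map inside
theorem pv_map_foldl {α : Type} (h : List String → α) (F : Int → List (List String))
    (ns : List Int) (acc : List (List String)) :
    (ns.foldl (fun a n => a ++ F n) acc).map h
      = ns.foldl (fun a n => a ++ (F n).map h) (acc.map h) := by
  induction ns generalizing acc with
  | nil => rfl
  | cons n ns ih => rw [List.foldl_cons, List.foldl_cons, ih, List.map_append]

-- ===== VERDICT (by name: the statement is the Claim_ definition above) =====
theorem find_optimal_bone_order_spec : Claim_equal_find_optimal_bone_order := by
  intro bcd maxLength _
  show _ = _
  unfold find_optimal_bone_order find_optimal_bone_order_alt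
  simp only [PySem.List.foldl_append_singleton_eq_map, List.nil_append]
  have hA : ∀ (acc : List (List String)) (n : Int),
      bcd.foldl (fun acc kv =>
        if ((pvLookup bcd kv.1).length : Int) == n then acc ++ [pvLookup bcd kv.1] else acc) acc
      = acc ++ (bcd.map (fun kv => pvLookup bcd kv.1)).filter
          (fun c => ((c.length : Int) == n)) := by
    intro acc n
    rw [PySem.List.foldl_append_if (l := bcd)
        (p := fun kv : String × List String => ((pvLookup bcd kv.1).length : Int) == n)
        (f := fun kv : String × List String => pvLookup bcd kv.1)]
    rw [List.filter_map]
    rfl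
  simp only [hA, pv_bucket]
  rw [pv_map_foldl]
  rfl
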